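-- pv_equiv track=rewrite | github.com/Clinical-Genomics-Lund/cll_genie | cll_genie/blueprints/main/reports.py | get_subset_string
-- ===== SOURCE A (Python) =====
-- def get_subset_string(results_dict):
--     seqs = list(results_dict.keys())
--     return_string = ""
--     return_subset = None
--     subset_ids = list(
--         set(
--             [
--                 results_dict[seq_id]["summary"]["CLL subset"]
--                 for seq_id in seqs
--                 if results_dict[seq_id]["summary"]["CLL subset"] is not None
--             ]
--         )
--     )
--     subset_count = len(subset_ids)
--
--     if subset_count == 1 and subset_ids[0] is not None:
--         return_string = (
--             f"Vidare påvisas subsettillhörighet till subset {subset_ids[0]}"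
--         )
--         return_subset = subset_ids[0]
--
--     elif (subset_count == 1 and subset_ids[0] is None) or subset_count == 0:
--         return_string = f"Analysen påvisar ingen subsettillhörighet."
--
--     elif subset_count > 1:
--         return_string = f"Dessutom visar delmängdsanalysen motsägelsefullt delmängdsmedlemskap med avseende på delmängd #2 eller #8 i det aktuella urvalet. Någon avgörande delmängdstilldelning kan därför inte göras."
--
--     return return_string, return_subset
-- ===== SOURCE B (Python) =====
-- def get_subset_string(results_dict):
--     first = None
--     conflict = False
--     for entry in results_dict.values():
--         subset = entry["summary"]["CLL subset"]
--         if subset is None: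
--             continue
--         if first is None:
--             first = subset
--         elif subset != first:
--             conflict = True
--     if conflict:
--         return (
--             f"Dessutom visar delmängdsanalysen motsägelsefullt delmängdsmedlemskap med avseende på delmängd #2 eller #8 i det aktuella urvalet. Någon avgörande delmängdstilldelning kan därför inte göras.",
--             None,
--         )
--     if first is None:
--         return ("Analysen påvisar ingen subsettillhörighet.", None)
--     return (f"Vidare påvisas subsettillhörighet till subset {first}", first)
-- ===== Notes on version B (the rewrite author's own statement) =====
-- stated objective: simpler
-- what changed: Replaces the keys-list + lookup comprehension + distinct-set + length branching with a single pass over the dict values maintaining just a first-seen subset and a conflict flag.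
import Mathlib
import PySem

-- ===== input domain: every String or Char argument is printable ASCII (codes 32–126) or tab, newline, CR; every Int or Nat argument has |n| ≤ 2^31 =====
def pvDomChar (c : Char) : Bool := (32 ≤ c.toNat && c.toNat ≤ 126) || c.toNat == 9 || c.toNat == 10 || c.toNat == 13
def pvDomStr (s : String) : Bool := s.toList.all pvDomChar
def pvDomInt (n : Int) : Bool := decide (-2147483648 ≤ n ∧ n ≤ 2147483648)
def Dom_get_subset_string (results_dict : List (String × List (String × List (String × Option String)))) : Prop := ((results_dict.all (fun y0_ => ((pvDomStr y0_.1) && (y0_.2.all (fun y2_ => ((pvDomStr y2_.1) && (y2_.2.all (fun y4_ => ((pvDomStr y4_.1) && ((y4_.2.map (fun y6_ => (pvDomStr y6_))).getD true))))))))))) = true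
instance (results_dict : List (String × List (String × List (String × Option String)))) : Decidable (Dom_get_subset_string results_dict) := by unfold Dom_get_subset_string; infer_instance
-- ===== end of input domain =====

-- B replaces the set-of-distinct-subsets + length branching by one pass over the values with a
-- first-seen subset and a conflict flag (objective: simpler). Return value equivalence only.

-- shared subscript chain results_dict[...]["summary"]["CLL subset"] (exact where both keys are
-- present, which Pre_ guarantees; where Python raises KeyError this returns none)
def pvEntrySubset (entry : List (String × List (String × Option String))) : Option String :=
  (PySem.Dict.ofList ((PySem.Dict.ofList entry).getD "summary" [])).getD "CLL subset" none

-- ===== PORT A =====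
def get_subset_string (results_dict : List (String × List (String × List (String × Option String)))) : String × Option String :=
  let d := PySem.Dict.ofList results_dict
  let seqs := d.keys
  -- comprehension: the subset of each seq_id's summary, keeping only the non-None ones
  let subset_ids := PySem.Set.ofList (seqs.filterMap (fun seq_id => pvEntrySubset (d.getD seq_id [])))
  let subset_count := subset_ids.length
  if subset_count == 1 then
    -- the 'subset_ids[0] is None' tests of A can never fire: None values were filtered out
    ("Vidare påvisas subsettillhörighet till subset " ++ subset_ids[0]!, some subset_ids[0]!)
  else if subset_count == 0 then
    ("Analysen påvisar ingen subsettillhörighet.", none)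
  else
    ("Dessutom visar delmängdsanalysen motsägelsefullt delmängdsmedlemskap med avseende på delmängd #2 eller #8 i det aktuella urvalet. Någon avgörande delmängdstilldelning kan därför inte göras.", none)

-- ===== PORT B =====
def get_subset_string_alt (results_dict : List (String × List (String × List (String × Option String)))) : String × Option String :=
  let st := (PySem.Dict.ofList results_dict).values.foldl
    (fun (st : Option String × Bool) entry =>
      match pvEntrySubset entry with
      | none => st                           -- subset is None: continue
      | some subset =>
        match st.1 with
        | none => (some subset, st.2)        -- first is None: first = subset
        | some first => if subset ≠ first then (st.1, true) else st)
    (none, false)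
  if st.2 then
    ("Dessutom visar delmängdsanalysen motsägelsefullt delmängdsmedlemskap med avseende på delmängd #2 eller #8 i det aktuella urvalet. Någon avgörande delmängdstilldelning kan därför inte göras.", none)
  else
    match st.1 with
    | none => ("Analysen påvisar ingen subsettillhörighet.", none)
    | some first => ("Vidare påvisas subsettillhörighet till subset " ++ first, some first)

-- ===== PRECONDITION & SPEC =====
-- Pre_ excludes exactly the inputs on which Python A raises KeyError: some entry lacks the
-- "summary" key or its summary lacks the "CLL subset" key.
def pvEntryOk (entry : List (String × List (String × Option String))) : Bool :=
  match (PySem.Dict.ofList entry).get? "summary" with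
  | none => false
  | some sd => ((PySem.Dict.ofList sd).get? "CLL subset").isSome

def Pre_get_subset_string (results_dict : List (String × List (String × List (String × Option String)))) : Prop :=
  (PySem.Dict.ofList results_dict).items.all (fun p => pvEntryOk p.2) = true

instance (results_dict : List (String × List (String × List (String × Option String)))) : Decidable (Pre_get_subset_string results_dict) := by unfold Pre_get_subset_string; infer_instance

def pvWitness_get_subset_string : (List (String × List (String × List (String × Option String)))) :=
  [("s1", [("summary", [("CLL subset", some "2")])]), ("s2", [("summary", [("CLL subset", none)])])]

def Spec_get_subset_string (results_dict : List (String × List (String × List (String × Option String)))) (out : String × Option String) : Prop := out = get_subset_string_alt results_dict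
instance (results_dict : List (String × List (String × List (String × Option String)))) (out : String × Option String) : Decidable (Spec_get_subset_string results_dict out) := by unfold Spec_get_subset_string; infer_instance

-- ===== CLAIM (what is proved, stated in full; the proofs are below) =====
def Claim_equal_get_subset_string : Prop := ∀ (results_dict : List (String × List (String × List (String × Option String)))), Dom_get_subset_string results_dict → Pre_get_subset_string results_dict → Spec_get_subset_string results_dict (get_subset_string results_dict)

-- ===== LEMMAS AND PROOFS =====

-- B's loop body, seen on the already-filtered list of subset strings
def pvStep (st : Option String × Bool) (s : String) : Option String × Bool :=
  match st.1 with
  | none => (some s, st.2)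
  | some first => if s ≠ first then (st.1, true) else st

lemma foldl_pvStep_some (l : List String) (f : String) (b : Bool) :
    l.foldl pvStep (some f, b) = (some f, b || l.any (fun s => s ≠ f)) := by
  induction l generalizing b with
  | nil => simp
  | cons x xs ih =>
    simp only [List.foldl_cons, List.any_cons]
    by_cases hx : x = f
    · subst hx; simpa [pvStep] using ih b
    · simp only [pvStep, if_pos (by simpa using hx)]
      rw [ih true]
      simp only [show (decide ¬x = f) = true by simpa using hx]
      simp

lemma foldl_pvStep_cons (v : String) (t : List String) :
    (v :: t).foldl pvStep (none, false) = (some v, t.any (fun s => s ≠ v)) := by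
  simp only [List.foldl_cons]
  rw [show pvStep (none, false) v = (some v, false) from rfl, foldl_pvStep_some]
  simp

lemma foldl_add_all_eq (l : List String) (v : String) :
    l.all (fun s => s == v) = true → ∀ (s : List String), v ∈ s →
      l.foldl PySem.Set.add s = s := by
  induction l with
  | nil => intro _ s _; simp
  | cons x xs ih =>
    intro h s hv
    simp only [List.all_cons, Bool.and_eq_true, beq_iff_eq] at h
    simp only [List.foldl_cons]
    have hadd : PySem.Set.add s x = s := by
      rw [h.1]; simp [PySem.Set.add, PySem.Set.contains, hv]
    rw [hadd]
    exact ih h.2 s hv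

lemma setOfList_all_eq (v : String) (l : List String) (h : l.all (fun s => s == v) = true) :
    PySem.Set.ofList (v :: l) = [v] := by
  show (v :: l).foldl PySem.Set.add [] = [v]
  simp only [List.foldl_cons]
  rw [show PySem.Set.add [] v = [v] from rfl]
  exact foldl_add_all_eq l v h [v] (by simp)

lemma one_lt_length_of_two_mem {t : List String} {x y : String}
    (hx : x ∈ t) (hy : y ∈ t) (hne : x ≠ y) : 1 < t.length := by
  match t with
  | [] => simp at hx
  | [a] => simp at hx hy; exact absurd (hx.trans hy.symm) hne
  | a :: b :: r => simp

-- the common core: the distinct-set branching and the flag-pass branching agree on any list of subsets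
set_option maxRecDepth 8192 in
lemma core_eq (vals : List String) :
    (if (PySem.Set.ofList vals).length == 1 then
       ("Vidare påvisas subsettillhörighet till subset " ++ (PySem.Set.ofList vals)[0]!,
        some (PySem.Set.ofList vals)[0]!)
     else if (PySem.Set.ofList vals).length == 0 then
       ("Analysen påvisar ingen subsettillhörighet.", (none : Option String))
     else
       ("Dessutom visar delmängdsanalysen motsägelsefullt delmängdsmedlemskap med avseende på delmängd #2 eller #8 i det aktuella urvalet. Någon avgörande delmängdstilldelning kan därför inte göras.", none)) =
    (if (vals.foldl pvStep (none, false)).2 then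
       ("Dessutom visar delmängdsanalysen motsägelsefullt delmängdsmedlemskap med avseende på delmängd #2 eller #8 i det aktuella urvalet. Någon avgörande delmängdstilldelning kan därför inte göras.", none)
     else
       match (vals.foldl pvStep (none, false)).1 with
       | none => ("Analysen påvisar ingen subsettillhörighet.", none)
       | some first => ("Vidare påvisas subsettillhörighet till subset " ++ first, some first)) := by
  cases vals with
  | nil => rfl
  | cons v t =>
    rw [foldl_pvStep_cons]
    by_cases hc : t.any (fun s => s ≠ v) = true
    · -- a conflicting value exists: the distinct set has at least 2 elements
      obtain ⟨s, hs, hne⟩ := List.any_eq_true.mp hc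
      have hne' : s ≠ v := by simpa using hne
      have h2 : 1 < (PySem.Set.ofList (v :: t)).length :=
        one_lt_length_of_two_mem (x := v) (y := s)
          (by rw [PySem.Set.mem_ofList]; simp)
          (by rw [PySem.Set.mem_ofList]; simp [hs])
          (Ne.symm hne')
      have e1 : ((PySem.Set.ofList (v :: t)).length == 1) = false := by
        rw [beq_eq_false_iff_ne]; omega
      have e0 : ((PySem.Set.ofList (v :: t)).length == 0) = false := by
        rw [beq_eq_false_iff_ne]; omega
      rw [e1, e0, hc]
      rfl
    · -- no conflicting value: every collected subset equals v, the distinct set is [v]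
      have hall : t.all (fun s => s == v) = true := by
        rw [List.all_eq_true]
        intro s hs
        by_contra hne
        exact hc (List.any_eq_true.mpr ⟨s, hs, by simpa using hne⟩)
      rw [setOfList_all_eq v t hall]
      simp only [Bool.not_eq_true] at hc
      rw [hc]
      rfl

lemma values_pipeline (rd : List (String × List (String × List (String × Option String)))) :
    (PySem.Dict.ofList rd).keys.filterMap
        (fun seq_id => pvEntrySubset ((PySem.Dict.ofList rd).getD seq_id [])) =
      (PySem.Dict.ofList rd).values.filterMap pvEntrySubset := by
  rw [PySem.Dict.values_eq_map_keys (PySem.Dict.ofList rd) (PySem.Dict.nodup_keys_ofList rd) []]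
  rw [List.filterMap_map]
  simp [Function.comp]

lemma foldl_skip_none (l : List (List (String × List (String × Option String)))) (st : Option String × Bool) :
    l.foldl (fun st entry =>
      match pvEntrySubset entry with
      | none => st
      | some subset =>
        match st.1 with
        | none => (some subset, st.2)
        | some first => if subset ≠ first then (st.1, true) else st) st =
    (l.filterMap pvEntrySubset).foldl pvStep st := by
  induction l generalizing st with
  | nil => rfl
  | cons x xs ih =>
    simp only [List.foldl_cons, List.filterMap_cons]
    cases h : pvEntrySubset x with
    | none => simpa [h] using ih st
    | some s =>
      simp only [List.foldl_cons]
      rw [ih]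
      rfl

-- ===== VERDICT (by name: the statement is the Claim_ definition above) =====
theorem get_subset_string_spec : Claim_equal_get_subset_string := by
  intro rd _ _
  show get_subset_string rd = get_subset_string_alt rd
  simp only [get_subset_string, get_subset_string_alt]
  rw [values_pipeline, foldl_skip_none]
  exact core_eq _
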